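-- pv_equiv track=rewrite | github.com/jbudynek/advent-of-code | aoc2015/d03-1.py | process
-- ===== SOURCE A (Python) =====
-- def increase(h2p, xx, yy):
--     if (xx, yy) not in h2p:
--         h2p[(xx, yy)] = 0
--     h2p[(xx, yy)] = h2p[(xx, yy)] + 1
--
-- def process(house_to_pres, s):
--
--     cur_x = 0
--     cur_y = 0
--
--     increase(house_to_pres, cur_x, cur_y)
--
--     for c in s:
--         if c == ">":
--             cur_x = cur_x + 1
--         elif c == "<":
--             cur_x = cur_x - 1
--         elif c == "^":
--             cur_y = cur_y + 1
--         else: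
--             cur_y = cur_y - 1
--         increase(house_to_pres, cur_x, cur_y)
--
--     return house_to_pres
-- ===== SOURCE B (Python) =====
-- def _count(s):
--     # counter of positions visited after each move (relative to the start), and net displacement
--     n = len(s)
--     if n == 0:
--         return {}, (0, 0)
--     if n == 1:
--         c = s
--         if c == ">":
--             d = (1, 0)
--         elif c == "<":
--             d = (-1, 0)
--         elif c == "^":
--             d = (0, 1)
--         else:
--             d = (0, -1)
--         return {d: 1}, d
--     c1, d1 = _count(s[:n // 2])
--     c2, d2 = _count(s[n // 2:])
--     for (x, y), k in c2.items():
--         p = (x + d1[0], y + d1[1])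
--         c1[p] = c1.get(p, 0) + k
--     return c1, (d1[0] + d2[0], d1[1] + d2[1])
--
-- def process(house_to_pres, s):
--     counts, _ = _count(s)
--     house_to_pres[(0, 0)] = house_to_pres.get((0, 0), 0) + 1
--     for p, k in counts.items():
--         house_to_pres[p] = house_to_pres.get(p, 0) + k
--     return house_to_pres
-- ===== Notes on version B (the rewrite author's own statement) =====
-- stated objective: alternative
-- what changed: Replaces A's single incremental walk (per-step dict increment from the running position) with a divide-and-conquer: recursively split the string, compute each half's relative visit-counter and net displacement, then shift the second half's counter by the first half's displacement and merge; finally add the start house and fold the counter into the passed-in dict.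
import Mathlib
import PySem

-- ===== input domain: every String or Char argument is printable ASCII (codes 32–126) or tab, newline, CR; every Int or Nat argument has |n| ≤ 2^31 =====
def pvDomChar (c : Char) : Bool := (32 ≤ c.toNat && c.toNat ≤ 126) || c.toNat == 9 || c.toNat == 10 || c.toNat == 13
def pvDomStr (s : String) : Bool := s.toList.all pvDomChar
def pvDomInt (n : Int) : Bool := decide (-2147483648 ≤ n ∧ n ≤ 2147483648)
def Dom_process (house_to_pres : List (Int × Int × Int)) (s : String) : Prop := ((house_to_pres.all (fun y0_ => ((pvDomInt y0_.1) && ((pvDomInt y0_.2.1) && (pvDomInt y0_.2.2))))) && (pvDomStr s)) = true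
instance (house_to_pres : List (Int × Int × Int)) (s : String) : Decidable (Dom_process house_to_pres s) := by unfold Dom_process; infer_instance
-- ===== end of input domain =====

-- ===== PORT A =====
-- B replaces A's incremental walk with a divide-and-conquer over the string: each half's
-- relative visit-counter and net displacement are computed recursively, the second half's
-- counter is shifted by the first half's displacement and merged, and at the end the start
-- house plus the counter are folded into the passed-in dict.
-- Both Pythons mutate the passed-in dict in place; the equivalence proved is about the
-- returned value (which is that same dict).
-- The Python dict {(x,y): n} is represented as List (Int × Int × Int) in insertion order;
-- pyHit/pyMem/pyGetD/pySet are hand ports of the dict primitives (exact: first-match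
-- lookup, in-place overwrite, append when absent).
def pyHit (p : Int × Int) (e : Int × Int × Int) : Bool := e.1 == p.1 && e.2.1 == p.2
def pyMem (d : List (Int × Int × Int)) (p : Int × Int) : Bool := d.any (pyHit p)
def pyGetD (d : List (Int × Int × Int)) (p : Int × Int) : Int :=
  match d.find? (pyHit p) with
  | some e => e.2.2
  | none => 0
def pySet : List (Int × Int × Int) → Int × Int → Int → List (Int × Int × Int)
  | [], p, v => [(p.1, p.2, v)]
  | e :: t, p, v => if pyHit p e then (p.1, p.2, v) :: t else e :: pySet t p v

-- A's helper 'increase': ensure the key exists with 0, then add 1.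
def pyIncrease (d : List (Int × Int × Int)) (x y : Int) : List (Int × Int × Int) :=
  let d1 := if pyMem d (x, y) then d else pySet d (x, y) 0
  pySet d1 (x, y) (pyGetD d1 (x, y) + 1)

-- the if/elif chain moving the position (shared text of both Pythons)
def stepPos (x y : Int) (c : Char) : Int × Int :=
  if c = '>' then (x + 1, y)
  else if c = '<' then (x - 1, y)
  else if c = '^' then (x, y + 1)
  else (x, y - 1)

def process (house_to_pres : List (Int × Int × Int)) (s : String) : List (Int × Int × Int) :=
  let d0 := pyIncrease house_to_pres 0 0
  (s.toList.foldl (fun st c =>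
      let p := stepPos st.2.1 st.2.2 c
      (pyIncrease st.1 p.1 p.2, p)) (d0, ((0 : Int), (0 : Int)))).1

-- ===== PORT B =====
-- _count: divide and conquer; returns (relative visit counter, net displacement)
def countDC : List Char → (List (Int × Int × Int)) × (Int × Int)
  | [] => ([], (0, 0))
  | [c] =>
    let d := stepPos 0 0 c
    ([(d.1, d.2, 1)], d)
  | c1 :: c2 :: rest =>
    let cs := c1 :: c2 :: rest
    let r1 := countDC (cs.take (cs.length / 2))
    let r2 := countDC (cs.drop (cs.length / 2))
    (r2.1.foldl (fun d e =>
        let p := (e.1 + r1.2.1, e.2.1 + r1.2.2)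
        pySet d p (pyGetD d p + e.2.2)) r1.1,
     (r1.2.1 + r2.2.1, r1.2.2 + r2.2.2))
  termination_by cs => cs.length
  decreasing_by
    · simp; omega
    · simp; omega

def process_alt (house_to_pres : List (Int × Int × Int)) (s : String) : List (Int × Int × Int) :=
  let counts := (countDC s.toList).1
  let h1 := pySet house_to_pres ((0 : Int), (0 : Int)) (pyGetD house_to_pres ((0 : Int), (0 : Int)) + 1)
  counts.foldl (fun d e => pySet d (e.1, e.2.1) (pyGetD d (e.1, e.2.1) + e.2.2)) h1

-- ===== PRECONDITION & SPEC =====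
def Spec_process (house_to_pres : List (Int × Int × Int)) (s : String) (out : List (Int × Int × Int)) : Prop := out = process_alt house_to_pres s
instance (house_to_pres : List (Int × Int × Int)) (s : String) (out : List (Int × Int × Int)) : Decidable (Spec_process house_to_pres s out) := by unfold Spec_process; infer_instance

-- ===== CLAIM (what is proved, stated in full; the proofs are below) =====
def Claim_equal_process : Prop := ∀ (house_to_pres : List (Int × Int × Int)) (s : String), Dom_process house_to_pres s → Spec_process house_to_pres s (process house_to_pres s)

-- ===== LEMMAS AND PROOFS =====

-- add w to the count of key p (Python's h[p] = h.get(p,0) + w)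
def addC (d : List (Int × Int × Int)) (p : Int × Int) (w : Int) : List (Int × Int × Int) :=
  pySet d p (pyGetD d p + w)

-- merging a counter into a dict, and per-position bumping
def foldM (h : List (Int × Int × Int)) (c : List (Int × Int × Int)) : List (Int × Int × Int) :=
  c.foldl (fun d e => pySet d (e.1, e.2.1) (pyGetD d (e.1, e.2.1) + e.2.2)) h
def foldA (h : List (Int × Int × Int)) (ps : List (Int × Int)) : List (Int × Int × Int) :=
  ps.foldl (fun d p => addC d p 1) h

-- the sequential counter of a position list
def counterOf (ps : List (Int × Int)) : List (Int × Int × Int) :=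
  ps.foldl (fun c p => pySet c p (pyGetD c p + 1)) []

def keysOf (d : List (Int × Int × Int)) : List (Int × Int) := d.map fun e => (e.1, e.2.1)

-- positions visited after the remaining characters, from (x,y)
def tailPos : List Char → Int → Int → List (Int × Int)
  | [], _, _ => []
  | c :: cs, x, y =>
    let p := stepPos x y c
    p :: tailPos cs p.1 p.2

-- final position after the characters, from (x,y)
def endPos : List Char → Int → Int → Int × Int
  | [], x, y => (x, y)
  | c :: cs, x, y =>
    let p := stepPos x y c
    endPos cs p.1 p.2

theorem pyHit_iff (p : Int × Int) (e : Int × Int × Int) :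
    pyHit p e = true ↔ (e.1, e.2.1) = p := by
  simp [pyHit, Prod.ext_iff]

theorem pyHit_self (p : Int × Int) (v : Int) : pyHit p (p.1, p.2, v) = true := by
  simp [pyHit]

theorem pyHit_false (p : Int × Int) (e : Int × Int × Int) (h : (e.1, e.2.1) ≠ p) :
    pyHit p e = false := by
  rw [Bool.eq_false_iff]; intro hh; exact h ((pyHit_iff _ _).1 hh)

theorem pyMem_iff (d : List (Int × Int × Int)) (p : Int × Int) :
    pyMem d p = true ↔ p ∈ keysOf d := by
  constructor
  · intro h
    obtain ⟨e, he, hh⟩ := List.any_eq_true.1 h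
    exact List.mem_map.2 ⟨e, he, (pyHit_iff _ _).1 hh⟩
  · intro h
    obtain ⟨e, he, hk⟩ := List.mem_map.1 h
    exact List.any_eq_true.2 ⟨e, he, (pyHit_iff _ _).2 hk⟩

theorem get_set_self (d : List (Int × Int × Int)) (p : Int × Int) (v : Int) :
    pyGetD (pySet d p v) p = v := by
  induction d with
  | nil => simp [pySet, pyGetD, List.find?_cons, pyHit_self]
  | cons e t ih =>
    by_cases h : pyHit p e = true
    · simp only [pySet, if_pos h]
      simp [pyGetD, List.find?_cons, pyHit_self]
    · have h' : pyHit p e = false := by simpa using h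
      simp only [pySet, if_neg h]
      simpa [pyGetD, List.find?_cons, h'] using ih

theorem get_set_ne (d : List (Int × Int × Int)) (p q : Int × Int) (v : Int) (hpq : p ≠ q) :
    pyGetD (pySet d p v) q = pyGetD d q := by
  have hq0 : pyHit q (p.1, p.2, v) = false := pyHit_false _ _ (by simpa using hpq)
  induction d with
  | nil => simp [pySet, pyGetD, List.find?_cons, hq0]
  | cons e t ih =>
    by_cases h : pyHit p e = true
    · have hq : pyHit q e = false :=
        pyHit_false _ _ (fun hk => hpq (((pyHit_iff _ _).1 h).symm.trans hk))
      simp only [pySet, if_pos h]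
      simp [pyGetD, List.find?_cons, hq, hq0]
    · simp only [pySet, if_neg h]
      by_cases hq : pyHit q e = true
      · simp [pyGetD, List.find?_cons, hq]
      · have hq' : pyHit q e = false := by simpa using hq
        simpa [pyGetD, List.find?_cons, hq'] using ih

theorem mem_set_self (d : List (Int × Int × Int)) (p : Int × Int) (v : Int) :
    pyMem (pySet d p v) p = true := by
  induction d with
  | nil => simp [pySet, pyMem, pyHit_self]
  | cons e t ih =>
    by_cases h : pyHit p e = true
    · simp only [pySet, if_pos h]
      simp [pyMem, pyHit_self]
    · simp only [pySet, if_neg h]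
      simp only [pyMem, List.any_cons] at ih ⊢
      simp [ih]

theorem mem_set_ne (d : List (Int × Int × Int)) (p q : Int × Int) (v : Int) (hpq : p ≠ q) :
    pyMem (pySet d p v) q = pyMem d q := by
  have hq0 : pyHit q (p.1, p.2, v) = false := pyHit_false _ _ (by simpa using hpq)
  induction d with
  | nil => simp [pySet, pyMem, hq0]
  | cons e t ih =>
    by_cases h : pyHit p e = true
    · have hq : pyHit q e = false :=
        pyHit_false _ _ (fun hk => hpq (((pyHit_iff _ _).1 h).symm.trans hk))
      simp only [pySet, if_pos h]
      simp [pyMem, hq, hq0]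
    · simp only [pySet, if_neg h]
      simp only [pyMem, List.any_cons] at ih ⊢
      rw [ih]

theorem set_set_self (d : List (Int × Int × Int)) (p : Int × Int) (a b : Int) :
    pySet (pySet d p a) p b = pySet d p b := by
  induction d with
  | nil => simp [pySet, pyHit_self]
  | cons e t ih =>
    by_cases h : pyHit p e = true
    · simp only [pySet, if_pos h]
      simp [pySet, pyHit_self]
    · simp only [pySet, if_neg h]
      simp [pySet, if_neg h, ih]

theorem set_set_comm (d : List (Int × Int × Int)) (p q : Int × Int) (a b : Int)
    (hpq : p ≠ q) (hm : pyMem d p = true) :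
    pySet (pySet d p a) q b = pySet (pySet d q b) p a := by
  induction d with
  | nil => simp [pyMem] at hm
  | cons e t ih =>
    by_cases hp : pyHit p e = true
    · have hq : pyHit q e = false :=
        pyHit_false _ _ (fun hk => hpq (((pyHit_iff _ _).1 hp).symm.trans hk))
      have hq' : pyHit q (p.1, p.2, a) = false := pyHit_false _ _ (by simpa using hpq)
      simp only [pySet, if_pos hp, if_neg (by simp [hq] : ¬ pyHit q e = true),
        if_neg (by simp [hq'] : ¬ pyHit q (p.1, p.2, a) = true)]
    · by_cases hq : pyHit q e = true
      · have hp' : pyHit p (q.1, q.2, b) = false :=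
          pyHit_false _ _ (by simpa [eq_comm] using hpq)
        simp only [pySet, if_neg hp, if_pos hq,
          if_neg (by simp [hp'] : ¬ pyHit p (q.1, q.2, b) = true)]
      · have hm' : pyMem t p = true := by
          simpa [pyMem, List.any_cons, hp] using hm
        simp only [pySet, if_neg hp, if_neg hq]
        rw [ih hm']

theorem addC_addC_self (d : List (Int × Int × Int)) (p : Int × Int) (a b : Int) :
    addC (addC d p a) p b = addC d p (a + b) := by
  simp only [addC, get_set_self, set_set_self]
  ring_nf

theorem addC_comm (d : List (Int × Int × Int)) (p q : Int × Int) (w : Int)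
    (hpq : p ≠ q) (hm : pyMem d p = true) :
    addC (addC d p 1) q w = addC (addC d q w) p 1 := by
  simp only [addC, get_set_ne _ _ _ _ hpq, get_set_ne _ _ _ _ (Ne.symm hpq)]
  exact set_set_comm _ _ _ _ _ hpq hm

theorem mem_addC (d : List (Int × Int × Int)) (p q : Int × Int) (w : Int)
    (hpq : p ≠ q) (hm : pyMem d p = true) : pyMem (addC d q w) p = true := by
  rw [addC, mem_set_ne _ _ _ _ (Ne.symm hpq)]; exact hm

-- addC at a key absent from c commutes past the whole merge fold
theorem foldM_addC_comm (c : List (Int × Int × Int)) (X : List (Int × Int × Int))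
    (p : Int × Int) (hfree : ∀ e ∈ c, (e.1, e.2.1) ≠ p) (hm : pyMem X p = true) :
    foldM (addC X p 1) c = addC (foldM X c) p 1 := by
  induction c generalizing X with
  | nil => simp [foldM]
  | cons e t ih =>
    have hne : (e.1, e.2.1) ≠ p := hfree e (by simp)
    have step : ∀ Y, foldM Y (e :: t) = foldM (addC Y (e.1, e.2.1) e.2.2) t := by
      intro Y; simp [foldM, addC]
    rw [step, step, addC_comm X p (e.1, e.2.1) e.2.2 (Ne.symm hne) hm]
    exact ih _ (fun e' he' => hfree e' (List.mem_cons_of_mem _ he'))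
      (mem_addC _ _ _ _ (Ne.symm hne) hm)

theorem keys_set (d : List (Int × Int × Int)) (p : Int × Int) (v : Int) :
    keysOf (pySet d p v) = if pyMem d p then keysOf d else keysOf d ++ [p] := by
  induction d with
  | nil => simp [pySet, pyMem, keysOf]
  | cons e t ih =>
    by_cases h : pyHit p e = true
    · have hm : pyMem (e :: t) p = true := by simp [pyMem, List.any_cons, h]
      simp only [pySet, if_pos h, if_pos hm]
      simp [keysOf, (pyHit_iff _ _).1 h]
    · have hmem : pyMem (e :: t) p = pyMem t p := by
        simp [pyMem, List.any_cons, h]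
      simp only [pySet, if_neg h, keysOf, List.map_cons, hmem]
      simp only [keysOf] at ih
      rw [ih]
      by_cases hm : pyMem t p = true
      · simp [hm]
      · simp only [Bool.not_eq_true] at hm
        simp [hm]

def nodupKeys (d : List (Int × Int × Int)) : Prop := (keysOf d).Nodup

theorem nodup_bump (c : List (Int × Int × Int)) (p : Int × Int) (h : nodupKeys c) :
    nodupKeys (addC c p 1) := by
  unfold nodupKeys at h ⊢
  rw [addC, keys_set]
  by_cases hm : pyMem c p = true
  · simpa [hm]
  · have hnp : p ∉ keysOf c := fun hp => hm ((pyMem_iff _ _).2 hp)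
    rw [if_neg hm]
    rw [List.nodup_append]
    refine ⟨h, List.nodup_singleton _, ?_⟩
    intro a ha b hb hab
    rw [List.mem_singleton] at hb
    exact hnp (by rw [← hb, ← hab]; exact ha)

-- crux: merging a counter bumped at p = merging the counter, then adding 1 at p
theorem merge_bump (c : List (Int × Int × Int)) (h : List (Int × Int × Int))
    (p : Int × Int) (hc : nodupKeys c) :
    foldM h (addC c p 1) = addC (foldM h c) p 1 := by
  induction c generalizing h with
  | nil =>
    simp [addC, pyGetD, pySet, foldM, List.find?]
  | cons e t ih =>
    have step : ∀ Y d, foldM Y (e :: d) = foldM (addC Y (e.1, e.2.1) e.2.2) d := by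
      intro Y d; simp [foldM, addC]
    by_cases he : pyHit p e = true
    · have hkey : (e.1, e.2.1) = p := (pyHit_iff _ _).1 he
      have hc' : ((e.1, e.2.1) :: keysOf t).Nodup := by simpa [nodupKeys, keysOf] using hc
      have hfree : ∀ e' ∈ t, (e'.1, e'.2.1) ≠ p := by
        intro e' he' hp
        exact (List.nodup_cons.1 hc').1
          (by rw [hkey, ← hp]; exact List.mem_map.2 ⟨e', he', rfl⟩)
      have hget : pyGetD (e :: t) p = e.2.2 := by simp [pyGetD, List.find?, he]
      have hset : addC (e :: t) p 1 = (p.1, p.2, e.2.2 + 1) :: t := by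
        simp [addC, pySet, he, hget]
      rw [hset]
      have step2 : foldM h ((p.1, p.2, e.2.2 + 1) :: t) = foldM (addC h p (e.2.2 + 1)) t := by
        simp [foldM, addC]
      rw [step2, step h t, hkey]
      rw [← addC_addC_self h p e.2.2 1]
      exact foldM_addC_comm t _ p hfree (by rw [addC]; exact mem_set_self _ _ _)
    · have hget : pyGetD (e :: t) p = pyGetD t p := by simp [pyGetD, List.find?, he]
      have hset : addC (e :: t) p 1 = e :: addC t p 1 := by
        simp [addC, pySet, he, hget]
      have hc' : ((e.1, e.2.1) :: keysOf t).Nodup := by simpa [nodupKeys, keysOf] using hc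
      rw [hset, step h (addC t p 1), step h t]
      exact ih _ (List.nodup_cons.1 hc').2

-- merging the counter of ps equals adding 1 per visit, in order
theorem counter_merge (ps : List (Int × Int)) (c : List (Int × Int × Int))
    (h : List (Int × Int × Int)) (hc : nodupKeys c) :
    foldM h (ps.foldl (fun c p => pySet c p (pyGetD c p + 1)) c) = foldA (foldM h c) ps := by
  induction ps generalizing c with
  | nil => simp [foldA]
  | cons p ps ih =>
    have : pySet c p (pyGetD c p + 1) = addC c p 1 := rfl
    simp only [List.foldl_cons, this]
    rw [ih (addC c p 1) (nodup_bump c p hc), merge_bump c h p hc]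
    simp [foldA]

theorem foldM_counterOf (h : List (Int × Int × Int)) (ps : List (Int × Int)) :
    foldM h (counterOf ps) = foldA h ps := by
  have := counter_merge ps [] h (by simp [nodupKeys, keysOf])
  simpa [counterOf, foldM] using this

theorem increase_eq (d : List (Int × Int × Int)) (x y : Int) :
    pyIncrease d x y = addC d (x, y) 1 := by
  unfold pyIncrease addC
  by_cases hm : pyMem d (x, y) = true
  · simp [hm]
  · have hm2 : ∀ e ∈ d, ¬ pyHit (x, y) e = true := by
      intro e he hh
      exact hm (List.any_eq_true.2 ⟨e, he, hh⟩)
    have hn : List.find? (pyHit (x, y)) d = none :=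
      List.find?_eq_none.2 fun e he => by simp [hm2 e he]
    have hget : pyGetD d (x, y) = 0 := by simp [pyGetD, hn]
    simp [hm, hget, get_set_self, set_set_self]

-- A's loop produces fold-of-addC over the tail positions
theorem loopA (cs : List Char) (d : List (Int × Int × Int)) (x y : Int) :
    (cs.foldl (fun st c =>
        let p := stepPos st.2.1 st.2.2 c
        (pyIncrease st.1 p.1 p.2, p)) (d, (x, y))).1 = foldA d (tailPos cs x y) := by
  induction cs generalizing d x y with
  | nil => simp [foldA, tailPos]
  | cons c cs ih =>
    simp only [List.foldl_cons, tailPos, foldA, List.foldl_cons]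
    rw [ih]
    simp [foldA, increase_eq, addC]

-- translation invariance of the step and the visited positions
theorem stepPos_shift (x y a b : Int) (c : Char) :
    stepPos (x + a) (y + b) c = ((stepPos x y c).1 + a, (stepPos x y c).2 + b) := by
  unfold stepPos
  split_ifs <;> simp <;> ring

theorem tailPos_shift (cs : List Char) (x y a b : Int) :
    tailPos cs (x + a) (y + b) = (tailPos cs x y).map (fun p => (p.1 + a, p.2 + b)) := by
  induction cs generalizing x y with
  | nil => simp [tailPos]
  | cons c cs ih =>
    simp only [tailPos, stepPos_shift, List.map_cons]
    exact congrArg _ (ih _ _)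

theorem endPos_shift (cs : List Char) (x y a b : Int) :
    endPos cs (x + a) (y + b) = ((endPos cs x y).1 + a, (endPos cs x y).2 + b) := by
  induction cs generalizing x y with
  | nil => simp [endPos]
  | cons c cs ih => simp only [endPos, stepPos_shift]; exact ih _ _

theorem tailPos_append (l1 l2 : List Char) (x y : Int) :
    tailPos (l1 ++ l2) x y
      = tailPos l1 x y ++ tailPos l2 (endPos l1 x y).1 (endPos l1 x y).2 := by
  induction l1 generalizing x y with
  | nil => simp [tailPos, endPos]
  | cons c cs ih => simp only [List.cons_append, tailPos, endPos, ih, List.cons_append]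

theorem endPos_append (l1 l2 : List Char) (x y : Int) :
    endPos (l1 ++ l2) x y = endPos l2 (endPos l1 x y).1 (endPos l1 x y).2 := by
  induction l1 generalizing x y with
  | nil => simp [endPos]
  | cons c cs ih => simp only [List.cons_append, endPos, ih]

-- shifting a dict entry by (a,b) on the key
def shiftE (a b : Int) (e : Int × Int × Int) : Int × Int × Int := (e.1 + a, e.2.1 + b, e.2.2)

theorem beq_add_right (x y a : Int) : (x + a == y + a) = (x == y) := by
  by_cases h : x = y
  · simp [h]
  · have h2 : x + a ≠ y + a := by omega
    simp [h, h2]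

theorem pyHit_shift (a b : Int) (p : Int × Int) (e : Int × Int × Int) :
    pyHit (p.1 + a, p.2 + b) (shiftE a b e) = pyHit p e := by
  simp [pyHit, shiftE, beq_add_right]

theorem get_shift (d : List (Int × Int × Int)) (a b : Int) (p : Int × Int) :
    pyGetD (d.map (shiftE a b)) (p.1 + a, p.2 + b) = pyGetD d p := by
  induction d with
  | nil => simp [pyGetD]
  | cons e t ih =>
    simp only [List.map_cons, pyGetD, List.find?_cons, pyHit_shift]
    cases h : pyHit p e with
    | true => simp [shiftE]
    | false => simpa [pyGetD] using ih

theorem set_shift (d : List (Int × Int × Int)) (a b : Int) (p : Int × Int) (v : Int) :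
    pySet (d.map (shiftE a b)) (p.1 + a, p.2 + b) v = (pySet d p v).map (shiftE a b) := by
  induction d with
  | nil => simp [pySet, shiftE]
  | cons e t ih =>
    simp only [List.map_cons, pySet, pyHit_shift]
    cases h : pyHit p e with
    | true => simp [shiftE]
    | false => simp [shiftE, ih]

theorem counterOf_shift_aux (ps : List (Int × Int)) (c : List (Int × Int × Int)) (a b : Int) :
    (ps.map (fun p => (p.1 + a, p.2 + b))).foldl
        (fun c p => pySet c p (pyGetD c p + 1)) (c.map (shiftE a b))
      = (ps.foldl (fun c p => pySet c p (pyGetD c p + 1)) c).map (shiftE a b) := by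
  induction ps generalizing c with
  | nil => simp
  | cons p ps ih =>
    simp only [List.map_cons, List.foldl_cons, get_shift, set_shift]
    exact ih _

theorem counterOf_shift (ps : List (Int × Int)) (a b : Int) :
    counterOf (ps.map (fun p => (p.1 + a, p.2 + b))) = (counterOf ps).map (shiftE a b) := by
  simpa [counterOf] using counterOf_shift_aux ps [] a b

-- the divide-and-conquer result characterised sequentially
theorem countDC_eq (cs : List Char) :
    countDC cs = (counterOf (tailPos cs 0 0), endPos cs 0 0) := by
  induction hn : cs.length using Nat.strong_induction_on generalizing cs with
  | _ n ih =>
    match cs with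
    | [] => simp [countDC, tailPos, counterOf, endPos]
    | [c] => simp [countDC, tailPos, counterOf, endPos, pyGetD, pySet, List.find?]
    | c1 :: c2 :: rest =>
      subst hn
      rw [countDC]
      have hsplit : (c1 :: c2 :: rest) =
          (c1 :: c2 :: rest).take ((c1 :: c2 :: rest).length / 2)
            ++ (c1 :: c2 :: rest).drop ((c1 :: c2 :: rest).length / 2) := by
        simp
      set l1 := (c1 :: c2 :: rest).take ((c1 :: c2 :: rest).length / 2) with hl1
      set l2 := (c1 :: c2 :: rest).drop ((c1 :: c2 :: rest).length / 2) with hl2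
      have hlen1 : l1.length < (c1 :: c2 :: rest).length := by
        rw [hl1]; simp; omega
      have hlen2 : l2.length < (c1 :: c2 :: rest).length := by
        rw [hl2]; simp; omega
      rw [ih _ hlen1 _ rfl, ih _ hlen2 _ rfl]
      set E := endPos l1 0 0 with hE
      have hmerge : ∀ (X : List (Int × Int × Int)) (C : List (Int × Int × Int)),
          C.foldl (fun d e =>
            let p := (e.1 + E.1, e.2.1 + E.2)
            pySet d p (pyGetD d p + e.2.2)) X = foldM X (C.map (shiftE E.1 E.2)) := by
        intro X C
        simp [foldM, List.foldl_map, shiftE]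
      refine Prod.ext ?_ ?_
      · show (counterOf (tailPos l2 0 0)).foldl _ (counterOf (tailPos l1 0 0)) = _
        rw [hmerge, ← counterOf_shift]
        have h2 : (tailPos l2 0 0).map (fun p => (p.1 + E.1, p.2 + E.2))
            = tailPos l2 E.1 E.2 := by
          have := tailPos_shift l2 0 0 E.1 E.2
          simpa using this.symm
        rw [h2, foldM_counterOf]
        have hsp : tailPos (c1 :: c2 :: rest) 0 0 = tailPos l1 0 0 ++ tailPos l2 E.1 E.2 := by
          conv_lhs => rw [hsplit]
          rw [tailPos_append]
        rw [hsp]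
        simp [counterOf, foldA, addC]
      · show ((endPos l1 0 0).1 + (endPos l2 0 0).1, (endPos l1 0 0).2 + (endPos l2 0 0).2)
            = endPos (c1 :: c2 :: rest) 0 0
        conv_rhs => rw [hsplit]
        rw [endPos_append]
        have h2 : endPos l2 (endPos l1 0 0).1 (endPos l1 0 0).2
            = ((endPos l2 0 0).1 + (endPos l1 0 0).1, (endPos l2 0 0).2 + (endPos l1 0 0).2) := by
          simpa using endPos_shift l2 0 0 (endPos l1 0 0).1 (endPos l1 0 0).2
        rw [h2]
        exact Prod.ext (by ring) (by ring)

-- ===== VERDICT (by name: the statement is the Claim_ definition above) =====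
theorem process_spec : Claim_equal_process := by
  intro h s _
  show process h s = process_alt h s
  unfold process process_alt
  rw [loopA, countDC_eq]
  show foldA (pyIncrease h 0 0) (tailPos s.toList 0 0)
      = foldM (pySet h ((0:Int),(0:Int)) (pyGetD h ((0:Int),(0:Int)) + 1))
          (counterOf (tailPos s.toList 0 0))
  rw [foldM_counterOf, increase_eq]
  rfl
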